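-- pv_equiv track=rewrite | github.com/tomkurowski/vcf2loc | src/site_to_marker.py | _convert_genotypes_cp
-- ===== SOURCE A (Python) =====
-- from typing import Dict, List, Union
--
-- _HOM_GENOTYPES = {'0/0', '1/1'}
--
-- _HET_GENOTYPES = {'0/1', '1/0'}
--
-- def _convert_genotypes_cp(
--     segregation_type: str,
--     genotypes: Dict[str, str],
--     parent_a: str,
--     parent_b: str,
--     sample_names: List[str],
--     keep_invalid_calls: bool
-- ):
--     return {
--         sample_name: _convert_genotype_cp(
--             segregation_type,
--             genotypes[sample_name],
--             genotypes[parent_a],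
--             genotypes[parent_b],
--             keep_invalid_calls
--         )
--         for sample_name in sample_names
--         if sample_name not in [parent_a, parent_b]
--     }
--
-- def _convert_genotype_cp(
--     segregation_type: str,
--     genotype: str,
--     parent_a_genotype: str,
--     parent_b_genotype: str,
--     keep_invalid: bool
-- ):
--     genotype_code = '--'
--     if genotype == './.':
--         genotype_code = '--'
--     if segregation_type == '<nnxnp>':
--         genotype_code = _convert_nnxnp(
--             genotype, parent_a_genotype, keep_invalid
--         )
--     elif segregation_type == '<lmxll>':
--         genotype_code = _convert_lmxll(
--             genotype, parent_b_genotype, keep_invalid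
--         )
--     elif segregation_type == '<hkxhk>':
--         genotype_code = _convert_hkxhk(genotype)
--     return genotype_code
--
-- def _convert_nnxnp(genotype: str, parent_a_genotype: str, keep_invalid: bool):
--     genotype_code = '--'
--     if genotype in _HOM_GENOTYPES:
--         if genotype == parent_a_genotype:
--             genotype_code = 'nn'
--         elif keep_invalid:
--             # 'pp' is not a valid genotype for <nnxnp>
--             genotype_code = 'pp'
--         else:
--             # Changing invalid genotype to unknown.
--             genotype_code = '--'
--     elif genotype in _HET_GENOTYPES:
--         genotype_code = 'np'
--     return genotype_code
--
-- def _convert_lmxll(genotype: str, parent_b_genotype: str, keep_invalid: bool):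
--     genotype_code = '--'
--     if genotype in _HOM_GENOTYPES:
--         if genotype == parent_b_genotype:
--             genotype_code = 'll'
--         elif keep_invalid:
--             # 'mm' is not a valid genotype for <lmxll>
--             genotype_code = 'mm'
--         else:
--             # Changing invalid genotype to unknown.
--             genotype_code = '--'
--     elif genotype in _HET_GENOTYPES:
--         genotype_code = 'lm'
--     return genotype_code
--
-- def _convert_hkxhk(genotype: str):
--     genotype_code = '--'
--     if genotype in _HOM_GENOTYPES:
--         if genotype == '0/0':
--             genotype_code = 'hh'
--         elif genotype == '1/1':
--             genotype_code = 'kk'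
--     elif genotype in _HET_GENOTYPES:
--         genotype_code = 'hk'
--     return genotype_code
-- ===== SOURCE B (Python) =====
-- def _convert_genotypes_cp(
--     segregation_type,
--     genotypes,
--     parent_a,
--     parent_b,
--     sample_names,
--     keep_invalid_calls
-- ):
--     pa = genotypes.get(parent_a)
--     pb = genotypes.get(parent_b)
--     if segregation_type == '<nnxnp>':
--         table = {
--             '0/0': 'nn' if pa == '0/0' else ('pp' if keep_invalid_calls else '--'),
--             '1/1': 'nn' if pa == '1/1' else ('pp' if keep_invalid_calls else '--'),
--             '0/1': 'np',
--             '1/0': 'np',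
--         }
--     elif segregation_type == '<lmxll>':
--         table = {
--             '0/0': 'll' if pb == '0/0' else ('mm' if keep_invalid_calls else '--'),
--             '1/1': 'll' if pb == '1/1' else ('mm' if keep_invalid_calls else '--'),
--             '0/1': 'lm',
--             '1/0': 'lm',
--         }
--     elif segregation_type == '<hkxhk>':
--         table = {'0/0': 'hh', '1/1': 'kk', '0/1': 'hk', '1/0': 'hk'}
--     else:
--         table = {}
--     parents = {parent_a, parent_b}
--     return {
--         s: table.get(genotypes[s], '--')
--         for s in sample_names
--         if s not in parents
--     }
-- ===== Notes on version B (the rewrite author's own statement) =====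
-- stated objective: simpler
-- what changed: B specializes the branch logic once into a precomputed genotype->code lookup table for the given segregation type, parents and keep_invalid flag, then maps each non-parent sample through a single table.get, instead of re-running the per-sample if/elif converter cascade.
import Mathlib
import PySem

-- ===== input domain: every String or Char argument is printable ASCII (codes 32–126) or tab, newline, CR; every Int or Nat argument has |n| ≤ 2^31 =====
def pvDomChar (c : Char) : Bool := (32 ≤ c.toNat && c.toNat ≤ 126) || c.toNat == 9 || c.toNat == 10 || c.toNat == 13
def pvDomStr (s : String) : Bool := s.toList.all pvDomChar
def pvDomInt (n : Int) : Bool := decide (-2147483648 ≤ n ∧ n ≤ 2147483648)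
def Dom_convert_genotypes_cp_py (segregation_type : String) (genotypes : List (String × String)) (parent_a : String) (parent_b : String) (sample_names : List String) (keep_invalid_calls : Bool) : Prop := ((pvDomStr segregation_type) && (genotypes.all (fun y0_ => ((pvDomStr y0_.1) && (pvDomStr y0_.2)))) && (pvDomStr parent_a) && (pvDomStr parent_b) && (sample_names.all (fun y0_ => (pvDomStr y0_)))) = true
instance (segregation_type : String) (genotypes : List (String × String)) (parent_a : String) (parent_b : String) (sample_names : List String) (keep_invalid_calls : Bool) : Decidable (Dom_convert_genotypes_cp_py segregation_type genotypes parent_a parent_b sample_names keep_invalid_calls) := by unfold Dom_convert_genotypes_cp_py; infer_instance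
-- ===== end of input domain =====

-- B precomputes a genotype->code lookup table once for the given segregation type/parents/flag and maps samples through one table lookup, instead of A's per-sample if/elif converter cascade (objective: simpler).


-- ===== PORT A =====
-- _HOM_GENOTYPES / _HET_GENOTYPES module constants (Python sets)
def pvHomGenotypes : PySem.Set String := PySem.Set.ofList ["0/0", "1/1"]
def pvHetGenotypes : PySem.Set String := PySem.Set.ofList ["0/1", "1/0"]

def pv_convert_nnxnp (genotype : String) (parent_a_genotype : String) (keep_invalid : Bool) : String :=
  let genotype_code := "--"
  if PySem.Set.contains pvHomGenotypes genotype then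
    if genotype == parent_a_genotype then "nn"
    else if keep_invalid then "pp"
    else "--"
  else if PySem.Set.contains pvHetGenotypes genotype then "np"
  else genotype_code

def pv_convert_lmxll (genotype : String) (parent_b_genotype : String) (keep_invalid : Bool) : String :=
  let genotype_code := "--"
  if PySem.Set.contains pvHomGenotypes genotype then
    if genotype == parent_b_genotype then "ll"
    else if keep_invalid then "mm"
    else "--"
  else if PySem.Set.contains pvHetGenotypes genotype then "lm"
  else genotype_code

def pv_convert_hkxhk (genotype : String) : String :=
  let genotype_code := "--"
  if PySem.Set.contains pvHomGenotypes genotype then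
    if genotype == "0/0" then "hh"
    else if genotype == "1/1" then "kk"
    else genotype_code
  else if PySem.Set.contains pvHetGenotypes genotype then "hk"
  else genotype_code

def pv_convert_genotype_cp (segregation_type : String) (genotype : String) (parent_a_genotype : String) (parent_b_genotype : String) (keep_invalid : Bool) : String :=
  let genotype_code := "--"
  let genotype_code := if genotype == "./." then "--" else genotype_code
  if segregation_type == "<nnxnp>" then pv_convert_nnxnp genotype parent_a_genotype keep_invalid
  else if segregation_type == "<lmxll>" then pv_convert_lmxll genotype parent_b_genotype keep_invalid
  else if segregation_type == "<hkxhk>" then pv_convert_hkxhk genotype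
  else genotype_code

-- dict comprehension over sample_names; genotypes[k] lookups are total via .getD "", exact under Pre_ (where every key is present)
def convert_genotypes_cp_py (segregation_type : String) (genotypes : List (String × String)) (parent_a : String) (parent_b : String) (sample_names : List String) (keep_invalid_calls : Bool) : List (String × String) :=
  let gd : PySem.Dict String String := PySem.Dict.mk genotypes
  (sample_names.foldl
    (fun (acc : PySem.Dict String String) sample_name =>
      if [parent_a, parent_b].contains sample_name then acc
      else acc.insert sample_name
        (pv_convert_genotype_cp segregation_type
          ((gd.get? sample_name).getD "")
          ((gd.get? parent_a).getD "")
          ((gd.get? parent_b).getD "")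
          keep_invalid_calls))
    PySem.Dict.empty).items

-- ===== PORT B =====
-- table specialized to segregation_type / parent genotypes / keep flag; parents looked up with .get (Option)
def pv_table (segregation_type : String) (pa : Option String) (pb : Option String) (keep_invalid_calls : Bool) : PySem.Dict String String :=
  if segregation_type == "<nnxnp>" then
    PySem.Dict.ofList
      [("0/0", if pa == some "0/0" then "nn" else if keep_invalid_calls then "pp" else "--"),
       ("1/1", if pa == some "1/1" then "nn" else if keep_invalid_calls then "pp" else "--"),
       ("0/1", "np"), ("1/0", "np")]
  else if segregation_type == "<lmxll>" then
    PySem.Dict.ofList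
      [("0/0", if pb == some "0/0" then "ll" else if keep_invalid_calls then "mm" else "--"),
       ("1/1", if pb == some "1/1" then "ll" else if keep_invalid_calls then "mm" else "--"),
       ("0/1", "lm"), ("1/0", "lm")]
  else if segregation_type == "<hkxhk>" then
    PySem.Dict.ofList [("0/0", "hh"), ("1/1", "kk"), ("0/1", "hk"), ("1/0", "hk")]
  else PySem.Dict.empty

def convert_genotypes_cp_py_alt (segregation_type : String) (genotypes : List (String × String)) (parent_a : String) (parent_b : String) (sample_names : List String) (keep_invalid_calls : Bool) : List (String × String) :=
  let gd : PySem.Dict String String := PySem.Dict.mk genotypes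
  let table := pv_table segregation_type (gd.get? parent_a) (gd.get? parent_b) keep_invalid_calls
  let parents : PySem.Set String := PySem.Set.ofList [parent_a, parent_b]
  (sample_names.foldl
    (fun (acc : PySem.Dict String String) s =>
      if PySem.Set.contains parents s then acc
      else acc.insert s (table.getD ((gd.get? s).getD "") "--"))
    PySem.Dict.empty).items

-- ===== PRECONDITION & SPEC =====
-- Pre_ excludes exactly the inputs on which Python A raises KeyError: a non-parent sample name missing
-- from genotypes, or (when at least one non-parent sample exists) a parent missing from genotypes.
def Pre_convert_genotypes_cp_py (segregation_type : String) (genotypes : List (String × String)) (parent_a : String) (parent_b : String) (sample_names : List String) (keep_invalid_calls : Bool) : Prop :=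
  let others := sample_names.filter (fun s => !([parent_a, parent_b].contains s))
  (∀ s ∈ others, (PySem.Dict.mk genotypes).contains s = true) ∧
  (others ≠ [] → (PySem.Dict.mk genotypes).contains parent_a = true ∧ (PySem.Dict.mk genotypes).contains parent_b = true)
instance (segregation_type : String) (genotypes : List (String × String)) (parent_a : String) (parent_b : String) (sample_names : List String) (keep_invalid_calls : Bool) : Decidable (Pre_convert_genotypes_cp_py segregation_type genotypes parent_a parent_b sample_names keep_invalid_calls) := by unfold Pre_convert_genotypes_cp_py; infer_instance

def pvWitness_convert_genotypes_cp_py : String × (List (String × String)) × String × String × List String × Bool :=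
  ("<hkxhk>", [("s1", "0/1"), ("pa", "0/0"), ("pb", "1/1")], "pa", "pb", ["s1", "pa"], false)

def Spec_convert_genotypes_cp_py (segregation_type : String) (genotypes : List (String × String)) (parent_a : String) (parent_b : String) (sample_names : List String) (keep_invalid_calls : Bool) (out : List (String × String)) : Prop := out = convert_genotypes_cp_py_alt segregation_type genotypes parent_a parent_b sample_names keep_invalid_calls
instance (segregation_type : String) (genotypes : List (String × String)) (parent_a : String) (parent_b : String) (sample_names : List String) (keep_invalid_calls : Bool) (out : List (String × String)) : Decidable (Spec_convert_genotypes_cp_py segregation_type genotypes parent_a parent_b sample_names keep_invalid_calls out) := by unfold Spec_convert_genotypes_cp_py; infer_instance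

-- ===== CLAIM (what is proved, stated in full; the proofs are below) =====
def Claim_equal_convert_genotypes_cp_py : Prop := ∀ (segregation_type : String) (genotypes : List (String × String)) (parent_a : String) (parent_b : String) (sample_names : List String) (keep_invalid_calls : Bool), Dom_convert_genotypes_cp_py segregation_type genotypes parent_a parent_b sample_names keep_invalid_calls → Pre_convert_genotypes_cp_py segregation_type genotypes parent_a parent_b sample_names keep_invalid_calls → Spec_convert_genotypes_cp_py segregation_type genotypes parent_a parent_b sample_names keep_invalid_calls (convert_genotypes_cp_py segregation_type genotypes parent_a parent_b sample_names keep_invalid_calls)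

-- ===== LEMMAS AND PROOFS =====
set_option maxRecDepth 2000

-- membership in the two-element parents set equals Python's membership in the two-element list
lemma pv_parents_mem (pa pb s : String) :
    PySem.Set.contains (PySem.Set.ofList [pa, pb]) s = [pa, pb].contains s := by
  simp [PySem.Set.contains, PySem.Set.ofList, PySem.Set.add, PySem.Set.empty]
  by_cases h : pb = pa <;> simp [h]

-- lookup in a four-entry literal table, written as a nested if on the key
lemma pv_tbl_get (v1 v2 v3 v4 g : String) :
    PySem.Dict.getD (PySem.Dict.ofList [("0/0", v1), ("1/1", v2), ("0/1", v3), ("1/0", v4)]) g "--"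
      = if g == "0/0" then v1 else if g == "1/1" then v2 else if g == "0/1" then v3
        else if g == "1/0" then v4 else "--" := by
  have h : PySem.Dict.ofList [("0/0", v1), ("1/1", v2), ("0/1", v3), ("1/0", v4)]
      = PySem.Dict.mk [("0/0", v1), ("1/1", v2), ("0/1", v3), ("1/0", v4)] := rfl
  rw [h, PySem.Dict.getD_eq_get?_getD]
  simp only [PySem.Dict.get?_mk_cons, beq_iff_eq]
  by_cases g1 : g = "0/0"
  · subst g1; simp
  by_cases g2 : g = "1/1"
  · subst g2; simp
  by_cases g3 : g = "0/1"
  · subst g3; simp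
  by_cases g4 : g = "1/0"
  · subst g4; simp
  simp only [if_neg g1, if_neg g2, if_neg g3, if_neg g4]
  have n1 : ¬("0/0" = g) := fun hh => g1 hh.symm
  have n2 : ¬("1/1" = g) := fun hh => g2 hh.symm
  have n3 : ¬("0/1" = g) := fun hh => g3 hh.symm
  have n4 : ¬("1/0" = g) := fun hh => g4 hh.symm
  simp [PySem.Dict.get?, n1, n2, n3, n4]

-- A's nnxnp converter, with the parent genotype given as Optional lookup, in table-normal form
lemma pv_cell_nnxnp (g : String) (p : Option String) (k : Bool) :
    pv_convert_nnxnp g (p.getD "") k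
      = if g == "0/0" then (if p == some "0/0" then "nn" else if k then "pp" else "--")
        else if g == "1/1" then (if p == some "1/1" then "nn" else if k then "pp" else "--")
        else if g == "0/1" then "np" else if g == "1/0" then "np" else "--" := by
  unfold pv_convert_nnxnp pvHomGenotypes pvHetGenotypes
  by_cases g1 : g = "0/0"
  · subst g1; rcases p with _ | a
    · simp [PySem.Set.contains, PySem.Set.ofList, PySem.Set.add, PySem.Set.empty]
    · by_cases ha : a = "0/0"
      · subst ha; simp [PySem.Set.contains, PySem.Set.ofList, PySem.Set.add, PySem.Set.empty]
      · have ha' : ¬("0/0" = a) := fun hh => ha hh.symm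
        simp [PySem.Set.contains, PySem.Set.ofList, PySem.Set.add, PySem.Set.empty, ha, ha']
  by_cases g2 : g = "1/1"
  · subst g2; rcases p with _ | a
    · simp [PySem.Set.contains, PySem.Set.ofList, PySem.Set.add, PySem.Set.empty]
    · by_cases ha : a = "1/1"
      · subst ha; simp [PySem.Set.contains, PySem.Set.ofList, PySem.Set.add, PySem.Set.empty]
      · have ha' : ¬("1/1" = a) := fun hh => ha hh.symm
        simp [PySem.Set.contains, PySem.Set.ofList, PySem.Set.add, PySem.Set.empty, ha, ha']
  by_cases g3 : g = "0/1"
  · subst g3; simp [PySem.Set.contains, PySem.Set.ofList, PySem.Set.add, PySem.Set.empty]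
  by_cases g4 : g = "1/0"
  · subst g4; simp [PySem.Set.contains, PySem.Set.ofList, PySem.Set.add, PySem.Set.empty]
  simp [PySem.Set.contains, PySem.Set.ofList, PySem.Set.add, PySem.Set.empty, g1, g2, g3, g4]

-- A's lmxll converter in table-normal form
lemma pv_cell_lmxll (g : String) (p : Option String) (k : Bool) :
    pv_convert_lmxll g (p.getD "") k
      = if g == "0/0" then (if p == some "0/0" then "ll" else if k then "mm" else "--")
        else if g == "1/1" then (if p == some "1/1" then "ll" else if k then "mm" else "--")
        else if g == "0/1" then "lm" else if g == "1/0" then "lm" else "--" := by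
  unfold pv_convert_lmxll pvHomGenotypes pvHetGenotypes
  by_cases g1 : g = "0/0"
  · subst g1; rcases p with _ | a
    · simp [PySem.Set.contains, PySem.Set.ofList, PySem.Set.add, PySem.Set.empty]
    · by_cases ha : a = "0/0"
      · subst ha; simp [PySem.Set.contains, PySem.Set.ofList, PySem.Set.add, PySem.Set.empty]
      · have ha' : ¬("0/0" = a) := fun hh => ha hh.symm
        simp [PySem.Set.contains, PySem.Set.ofList, PySem.Set.add, PySem.Set.empty, ha, ha']
  by_cases g2 : g = "1/1"
  · subst g2; rcases p with _ | a
    · simp [PySem.Set.contains, PySem.Set.ofList, PySem.Set.add, PySem.Set.empty]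
    · by_cases ha : a = "1/1"
      · subst ha; simp [PySem.Set.contains, PySem.Set.ofList, PySem.Set.add, PySem.Set.empty]
      · have ha' : ¬("1/1" = a) := fun hh => ha hh.symm
        simp [PySem.Set.contains, PySem.Set.ofList, PySem.Set.add, PySem.Set.empty, ha, ha']
  by_cases g3 : g = "0/1"
  · subst g3; simp [PySem.Set.contains, PySem.Set.ofList, PySem.Set.add, PySem.Set.empty]
  by_cases g4 : g = "1/0"
  · subst g4; simp [PySem.Set.contains, PySem.Set.ofList, PySem.Set.add, PySem.Set.empty]
  simp [PySem.Set.contains, PySem.Set.ofList, PySem.Set.add, PySem.Set.empty, g1, g2, g3, g4]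

-- A's hkxhk converter in table-normal form
lemma pv_cell_hkxhk (g : String) :
    pv_convert_hkxhk g
      = if g == "0/0" then "hh" else if g == "1/1" then "kk"
        else if g == "0/1" then "hk" else if g == "1/0" then "hk" else "--" := by
  unfold pv_convert_hkxhk pvHomGenotypes pvHetGenotypes
  by_cases g1 : g = "0/0"
  · subst g1; simp [PySem.Set.contains, PySem.Set.ofList, PySem.Set.add, PySem.Set.empty]
  by_cases g2 : g = "1/1"
  · subst g2; simp [PySem.Set.contains, PySem.Set.ofList, PySem.Set.add, PySem.Set.empty]
  by_cases g3 : g = "0/1"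
  · subst g3; simp [PySem.Set.contains, PySem.Set.ofList, PySem.Set.add, PySem.Set.empty]
  by_cases g4 : g = "1/0"
  · subst g4; simp [PySem.Set.contains, PySem.Set.ofList, PySem.Set.add, PySem.Set.empty]
  simp [PySem.Set.contains, PySem.Set.ofList, PySem.Set.add, PySem.Set.empty, g1, g2, g3, g4]

-- the per-genotype cell lemma: A's converter cascade equals B's table lookup, for every genotype string
lemma pv_cell (st g : String) (pa pb : Option String) (k : Bool) :
    pv_convert_genotype_cp st g (pa.getD "") (pb.getD "") k
      = PySem.Dict.getD (pv_table st pa pb k) g "--" := by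
  unfold pv_convert_genotype_cp pv_table
  by_cases h1 : st = "<nnxnp>"
  · subst h1; simp [pv_cell_nnxnp, pv_tbl_get]
  by_cases h2 : st = "<lmxll>"
  · subst h2; simp [pv_cell_lmxll, pv_tbl_get]
  by_cases h3 : st = "<hkxhk>"
  · subst h3; simp [pv_cell_hkxhk, pv_tbl_get]
  simp [h1, h2, h3, PySem.Dict.getD, PySem.Dict.get?, PySem.Dict.empty]

-- both folds agree from any accumulator: the step functions are pointwise equal
lemma pv_fold_eq (st : String) (gd : PySem.Dict String String) (pa pb : String) (k : Bool)
    (samples : List String) (acc : PySem.Dict String String) :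
    samples.foldl
      (fun (acc : PySem.Dict String String) s =>
        if [pa, pb].contains s then acc
        else acc.insert s
          (pv_convert_genotype_cp st ((gd.get? s).getD "") ((gd.get? pa).getD "")
            ((gd.get? pb).getD "") k)) acc
    = samples.foldl
      (fun (acc : PySem.Dict String String) s =>
        if PySem.Set.contains (PySem.Set.ofList [pa, pb]) s then acc
        else acc.insert s
          (PySem.Dict.getD (pv_table st (gd.get? pa) (gd.get? pb) k) ((gd.get? s).getD "") "--"))
      acc := by
  induction samples generalizing acc with
  | nil => rfl
  | cons s rest ih =>
    rw [List.foldl_cons, List.foldl_cons, pv_parents_mem, pv_cell]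
    exact ih _

-- ===== VERDICT (by name: the statement is the Claim_ definition above) =====
theorem convert_genotypes_cp_py_spec : Claim_equal_convert_genotypes_cp_py := by
  intro st genotypes pa pb samples k _ _
  unfold Spec_convert_genotypes_cp_py convert_genotypes_cp_py convert_genotypes_cp_py_alt
  simp only []
  congr 1
  exact pv_fold_eq st (PySem.Dict.mk genotypes) pa pb k samples PySem.Dict.empty
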